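-- pv_equiv track=rewrite | github.com/apatel-NSLS/nsls-personal-toolkit | skills/pre-meeting-briefing/scripts/run_briefings.py | pick_attendee
-- ===== SOURCE A (Python) =====
-- SLT_EMAILS = {
--     "kprentiss@nsls.org":     "Kevin Prentiss",
--     "gtuerack@nsls.org":      "Gary Tuerack",
--     "astone@nsls.org":        "Adam Stone",
--     "asmith@nsls.org":        "Ashleigh Smith",
--     "ccapoccia@nsls.org":     "Cory Capoccia",
--     "cory.capoccia@gmail.com":"Cory Capoccia",
--     "mobrien@nsls.org":       "Michael O'Brien",
--     "hdarnell@nsls.org":      "Heather Darnell",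
--     "jfontanez@nsls.org":     "Jenna Fontanez",
--     "cbyers@nsls.org":        "Chelsea Byers",
--     "jtannenbaum@nsls.org":   "Jordan Tannenbaum",
-- }
--
-- def pick_attendee(invitees, exclude_email="apatel@nsls.org"):
--     """For a meeting, pick the SLT member on the invitee list (not Anish)."""
--     for inv in invitees:
--         email = (inv.get("email") or "").lower()
--         if email != exclude_email and email in SLT_EMAILS:
--             return email, SLT_EMAILS[email]
--     # Fallback: first non-Anish invitee
--     for inv in invitees:
--         email = (inv.get("email") or "").lower()
--         if email != exclude_email and email:
--             return email, inv.get("name", email.split("@")[0])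
--     return None, None
-- ===== SOURCE B (Python) =====
-- SLT_EMAILS = {
--     "kprentiss@nsls.org":     "Kevin Prentiss",
--     "gtuerack@nsls.org":      "Gary Tuerack",
--     "astone@nsls.org":        "Adam Stone",
--     "asmith@nsls.org":        "Ashleigh Smith",
--     "ccapoccia@nsls.org":     "Cory Capoccia",
--     "cory.capoccia@gmail.com":"Cory Capoccia",
--     "mobrien@nsls.org":       "Michael O'Brien",
--     "hdarnell@nsls.org":      "Heather Darnell",
--     "jfontanez@nsls.org":     "Jenna Fontanez",
--     "cbyers@nsls.org":        "Chelsea Byers",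
--     "jtannenbaum@nsls.org":   "Jordan Tannenbaum",
-- }
--
-- def pick_attendee(invitees, exclude_email="apatel@nsls.org"):
--     """Single pass: return the first non-excluded SLT member; remember the
--     first non-excluded non-empty invitee as a fallback along the way."""
--     fallback = None
--     for inv in invitees:
--         email = (inv.get("email") or "").lower()
--         if email != exclude_email and email in SLT_EMAILS:
--             return email, SLT_EMAILS[email]
--         if fallback is None and email != exclude_email and email:
--             fallback = (email, inv.get("name", email.split("@")[0]))
--     return fallback if fallback is not None else (None, None)
-- ===== Notes on version B (the rewrite author's own statement) =====
-- stated objective: alternative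
-- what changed: Replaced A's two sequential scans (SLT scan, then fallback scan) with one traversal that carries the first valid fallback in an accumulator and returns early on an SLT hit.
import Mathlib
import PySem

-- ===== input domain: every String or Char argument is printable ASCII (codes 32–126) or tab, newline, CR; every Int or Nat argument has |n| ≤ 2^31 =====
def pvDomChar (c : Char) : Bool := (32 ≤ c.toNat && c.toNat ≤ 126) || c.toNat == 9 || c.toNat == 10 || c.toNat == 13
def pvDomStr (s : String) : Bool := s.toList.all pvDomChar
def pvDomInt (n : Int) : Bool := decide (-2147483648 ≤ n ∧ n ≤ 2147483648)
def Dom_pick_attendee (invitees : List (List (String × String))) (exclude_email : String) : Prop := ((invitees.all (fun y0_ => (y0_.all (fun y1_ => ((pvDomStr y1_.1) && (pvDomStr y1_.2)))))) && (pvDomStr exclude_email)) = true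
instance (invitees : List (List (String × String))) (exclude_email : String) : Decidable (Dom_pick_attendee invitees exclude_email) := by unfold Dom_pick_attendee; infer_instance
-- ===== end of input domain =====

-- B replaces A's two sequential scans with ONE traversal carrying the first valid fallback
-- in an accumulator (objective: alternative decomposition; same cost).

-- ===== PORT A =====
-- the SLT_EMAILS module dict, as an association list; dict lookup = first match
def SLT_EMAILS : List (String × String) :=
  [("kprentiss@nsls.org", "Kevin Prentiss"),
   ("gtuerack@nsls.org", "Gary Tuerack"),
   ("astone@nsls.org", "Adam Stone"),
   ("asmith@nsls.org", "Ashleigh Smith"),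
   ("ccapoccia@nsls.org", "Cory Capoccia"),
   ("cory.capoccia@gmail.com", "Cory Capoccia"),
   ("mobrien@nsls.org", "Michael O'Brien"),
   ("hdarnell@nsls.org", "Heather Darnell"),
   ("jfontanez@nsls.org", "Jenna Fontanez"),
   ("cbyers@nsls.org", "Chelsea Byers"),
   ("jtannenbaum@nsls.org", "Jordan Tannenbaum")]

-- (inv.get("email") or "").lower(): absent key or empty value both give "", so getD "" is exact here
def pvEmailOf (inv : List (String × String)) : String :=
  PySem.Str.lower ((inv.lookup "email").getD "")

-- inv.get("name", email.split("@")[0]); sep "@" is nonempty so split? is some and the result non-empty: getD/headD never fire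
def pvNameOf (inv : List (String × String)) (email : String) : String :=
  (inv.lookup "name").getD (((PySem.Str.split? email "@").getD []).headD "")

-- A's first loop: return the first non-excluded SLT member
def pvScanSLT : List (List (String × String)) → String → Option (Option String × Option String)
  | [], _ => none
  | inv :: rest, ex =>
    let e := pvEmailOf inv
    if e ≠ ex then
      match SLT_EMAILS.lookup e with
      | some n => some (some e, some n)
      | none => pvScanSLT rest ex
    else pvScanSLT rest ex

-- A's second loop: first non-excluded invitee with a non-empty email
def pvScanFB : List (List (String × String)) → String → Option (Option String × Option String)
  | [], _ => none
  | inv :: rest, ex =>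
    let e := pvEmailOf inv
    if e ≠ ex ∧ e ≠ "" then some (some e, some (pvNameOf inv e)) else pvScanFB rest ex

def pick_attendee (invitees : List (List (String × String))) (exclude_email : String) : Option String × Option String :=
  match pvScanSLT invitees exclude_email with
  | some r => r
  | none => (pvScanFB invitees exclude_email).getD (none, none)

-- ===== PORT B =====
-- single pass with a remembered fallback (Source B's loop)
def pvGoB : List (List (String × String)) → String → Option (Option String × Option String) → Option String × Option String
  | [], _, fb => fb.getD (none, none)
  | inv :: rest, ex, fb =>
    let e := pvEmailOf inv
    if e ≠ ex ∧ (SLT_EMAILS.lookup e).isSome then (some e, SLT_EMAILS.lookup e)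
    else pvGoB rest ex (if fb.isNone ∧ e ≠ ex ∧ e ≠ "" then some (some e, some (pvNameOf inv e)) else fb)

def pick_attendee_alt (invitees : List (List (String × String))) (exclude_email : String) : Option String × Option String :=
  pvGoB invitees exclude_email none

-- ===== PRECONDITION & SPEC =====
def Spec_pick_attendee (invitees : List (List (String × String))) (exclude_email : String) (out : Option String × Option String) : Prop := out = pick_attendee_alt invitees exclude_email
instance (invitees : List (List (String × String))) (exclude_email : String) (out : Option String × Option String) : Decidable (Spec_pick_attendee invitees exclude_email out) := by unfold Spec_pick_attendee; infer_instance

-- ===== CLAIM (what is proved, stated in full; the proofs are below) =====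
def Claim_equal_pick_attendee : Prop := ∀ (invitees : List (List (String × String))) (exclude_email : String), Dom_pick_attendee invitees exclude_email → Spec_pick_attendee invitees exclude_email (pick_attendee invitees exclude_email)

-- ===== LEMMAS AND PROOFS =====
-- the single pass with accumulator fb equals: first SLT hit, else fb if set, else first fallback
theorem pvGoB_eq (l : List (List (String × String))) (ex : String)
    (fb : Option (Option String × Option String)) :
    pvGoB l ex fb =
      match pvScanSLT l ex with
      | some r => r
      | none =>
        match fb with
        | some r => r
        | none => (pvScanFB l ex).getD (none, none) := by
  induction l generalizing fb with
  | nil => cases fb <;> simp [pvGoB, pvScanSLT, pvScanFB]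
  | cons inv rest ih =>
    simp only [pvGoB, pvScanSLT, pvScanFB]
    by_cases hex : pvEmailOf inv = ex
    · simp only [hex, ne_eq, not_true_eq_false, false_and, if_false, and_false]
      rw [ih]
    · rcases h : SLT_EMAILS.lookup (pvEmailOf inv) with _ | n
      · simp only [Option.isSome_none]
        rw [ih]
        by_cases hempty : pvEmailOf inv = "" <;>
          cases fb <;> simp [hex, hempty]
      · simp [hex]

-- ===== VERDICT (by name: the statement is the Claim_ definition above) =====
theorem pick_attendee_spec : Claim_equal_pick_attendee := by
  intro invitees ex _
  unfold Spec_pick_attendee pick_attendee pick_attendee_alt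
  rw [pvGoB_eq]
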